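-- pv_equiv track=rewrite | github.com/conradylx/Python_Basic | 17.03.2021/Flame/flame.py | check_common_chars
-- ===== SOURCE A (Python) =====
-- def check_common_chars(his_name: str, her_name: str) -> int:
--     """Paragraph responsible for removing common characters from both names"""
--     my_str = ''
--     """Check character for first str"""
--     for char in his_name:
--         if char not in her_name:
--             my_str += char
--     """Check character for second str"""
--     for char in her_name:
--         if char not in his_name:
--             my_str += char
--     return len(my_str)
-- ===== SOURCE B (Python) =====
-- def check_common_chars(his_name: str, her_name: str) -> int:
--     """Count by complement: total length minus occurrences of shared characters."""
--     shared = set(his_name) & set(her_name)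
--     removed = sum(his_name.count(c) + her_name.count(c) for c in shared)
--     return len(his_name) + len(her_name) - removed
-- ===== Notes on version B (the rewrite author's own statement) =====
-- stated objective: simpler
-- what changed: Instead of scanning every character of each name against the whole other string and building a residual string, B computes the set of shared characters once and returns total length minus the summed occurrence counts of shared characters (complement counting).
import Mathlib
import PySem

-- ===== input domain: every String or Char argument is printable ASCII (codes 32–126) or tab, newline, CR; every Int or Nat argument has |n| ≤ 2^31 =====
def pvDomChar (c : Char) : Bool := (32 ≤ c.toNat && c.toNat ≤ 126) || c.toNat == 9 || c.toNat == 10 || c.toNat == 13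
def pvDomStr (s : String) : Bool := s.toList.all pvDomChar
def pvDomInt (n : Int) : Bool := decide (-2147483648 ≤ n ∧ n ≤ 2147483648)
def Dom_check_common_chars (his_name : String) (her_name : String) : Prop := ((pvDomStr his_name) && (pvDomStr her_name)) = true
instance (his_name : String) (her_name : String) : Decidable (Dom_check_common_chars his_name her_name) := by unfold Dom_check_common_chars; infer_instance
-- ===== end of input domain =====

-- B counts by complement (total length minus occurrences of shared characters) instead of
-- building a residual string by scanning each character against the whole other string; objective: simpler.

-- ===== PORT A =====
-- 'char not in her_name' tests a single character against a string: exactly char membership (List.contains).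
def check_common_chars (his_name : String) (her_name : String) : Int :=
  let h := his_name.toList
  let r := her_name.toList
  let myStr1 := h.foldl (fun acc c => if r.contains c then acc else acc ++ [c]) ([] : List Char)
  let myStr2 := r.foldl (fun acc c => if h.contains c then acc else acc ++ [c]) myStr1
  (myStr2.length : Int)

-- ===== PORT B =====
-- str.count of a single character is its character count (exact); summing over the set is order-independent.
def check_common_chars_alt (his_name : String) (her_name : String) : Int :=
  let h := his_name.toList
  let r := her_name.toList
  let shared : PySem.Set Char := PySem.Set.inter (PySem.Set.ofList h) (PySem.Set.ofList r)
  let removed : Int := (shared.map (fun c => ((h.count c : Int) + (r.count c : Int)))).sum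
  PySem.Str.len his_name + PySem.Str.len her_name - removed

-- ===== PRECONDITION & SPEC =====
def Spec_check_common_chars (his_name : String) (her_name : String) (out : Int) : Prop := out = check_common_chars_alt his_name her_name
instance (his_name : String) (her_name : String) (out : Int) : Decidable (Spec_check_common_chars his_name her_name out) := by unfold Spec_check_common_chars; infer_instance

-- ===== CLAIM (what is proved, stated in full; the proofs are below) =====
def Claim_equal_check_common_chars : Prop := ∀ (his_name : String) (her_name : String), Dom_check_common_chars his_name her_name → Spec_check_common_chars his_name her_name (check_common_chars his_name her_name)

-- ===== LEMMAS AND PROOFS =====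

-- A's skip-or-append loop keeps exactly the characters failing p.
theorem foldl_skip_if {α : Type} (p : α → Bool) (l : List α) (acc : List α) :
    l.foldl (fun acc x => if p x then acc else acc ++ [x]) acc
      = acc ++ (l.filter (fun x => !p x)).map id := by
  rw [← PySem.List.foldl_append_if (fun x => !p x) id l acc]
  congr 1
  funext a x
  cases p x <;> simp

-- Summing the counts of a nodup enumeration of the elements of l satisfying t gives the filter's length.
theorem sum_count_over_nodup {α : Type} [DecidableEq α] (l s : List α) (t : α → Bool)
    (hnd : s.Nodup) (hm : ∀ c, c ∈ s ↔ c ∈ l ∧ t c = true) :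
    (s.map (fun c => l.count c)).sum = (l.filter t).length := by
  have hperm : s.Perm (l.filter t).dedup := by
    rw [List.perm_ext_iff_of_nodup hnd (List.nodup_dedup _)]
    intro a
    rw [List.mem_dedup, List.mem_filter, hm]
  calc (s.map (fun c => l.count c)).sum
      = (s.map (fun c => (l.filter t).count c)).sum := by
        apply congrArg
        apply List.map_congr_left
        intro c hc
        exact (List.count_filter ((hm c).mp hc).2).symm
    _ = ((l.filter t).dedup.map (fun c => (l.filter t).count c)).sum :=
        (hperm.map _).sum_eq
    _ = (l.filter t).length := List.sum_map_count_dedup_eq_length _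

-- ===== VERDICT (by name: the statement is the Claim_ definition above) =====
theorem check_common_chars_spec : Claim_equal_check_common_chars := by
  intro his her _
  unfold Spec_check_common_chars check_common_chars check_common_chars_alt
  set h := his.toList with hh
  set r := her.toList with hr
  simp only [foldl_skip_if]
  have hnd : (PySem.Set.inter (PySem.Set.ofList h) (PySem.Set.ofList r)).Nodup :=
    PySem.Set.nodup_inter _ _ (PySem.Set.nodup_ofList h)
  have hmem : ∀ c, c ∈ PySem.Set.inter (PySem.Set.ofList h) (PySem.Set.ofList r) ↔ c ∈ h ∧ c ∈ r := by
    intro c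
    rw [PySem.Set.mem_inter, PySem.Set.mem_ofList, PySem.Set.mem_ofList]
  have s1 : ((PySem.Set.inter (PySem.Set.ofList h) (PySem.Set.ofList r)).map
      (fun c => h.count c)).sum = (h.filter (fun c => r.contains c)).length := by
    apply sum_count_over_nodup _ _ _ hnd
    intro c; rw [hmem]; simp
  have s2 : ((PySem.Set.inter (PySem.Set.ofList h) (PySem.Set.ofList r)).map
      (fun c => r.count c)).sum = (r.filter (fun c => h.contains c)).length := by
    apply sum_count_over_nodup _ _ _ hnd
    intro c; rw [hmem]; simp; tauto
  have split : ∀ (l : List Char) (q : Char → Bool),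
      (l.filter q).length + (l.filter (fun x => !q x)).length = l.length := by
    intro l q
    exact (List.length_eq_length_filter_add q).symm
  have key : ((PySem.Set.inter (PySem.Set.ofList h) (PySem.Set.ofList r)).map
      (fun c => ((h.count c : Int) + (r.count c : Int)))).sum
      = ((h.filter (fun c => r.contains c)).length : Int)
        + ((r.filter (fun c => h.contains c)).length : Int) := by
    rw [PySem.List.sum_map_add_int, ← s1, ← s2]
    push_cast
    simp [Function.comp_def]
  have lenh : PySem.Str.len his = (h.length : Int) := by
    simp [PySem.Str.len_eq, hh, String.length_toList]
  have lenr : PySem.Str.len her = (r.length : Int) := by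
    simp [PySem.Str.len_eq, hr, String.length_toList]
  simp only [key, lenh, lenr, List.map_id, List.length_append, List.nil_append]
  have e1 := split h (fun c => r.contains c)
  have e2 := split r (fun c => h.contains c)
  push_cast
  omega
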